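-- pv_equiv track=rewrite | github.com/Michal0ss/WDI | WDI_algo/Zestaw_3/z95.py | find_max_ratio_position
-- ===== SOURCE A (Python) =====
-- def find_max_ratio_position(t):
--     """Znajduje wiersz i kolumnę elementu o największym ilorazie sumy kolumny do sumy wiersza."""
--
--     n=len(t)
--     max_licz = -1
--     #Ustawiamy go na bardzo małą wartość, aby każda pierwsza obliczona wartość ilorazu była większa i nadpisała tę wartość.
--     max_mian = 1
--     result_row, result_col = -1,-1
--
--     for row in range(n):
--         row_sum=0
--         for j in range(n):
--             row_sum+=t[row][j]
--
--         for col in range(n):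
--             col_sum=0
--             for i in range(n):
--                 col_sum+=t[i][col]
--
--             if row_sum>0:
--                 if col_sum*max_mian>max_licz*row_sum:
--                     max_licz = col_sum
--                     max_mian = row_sum
--                     result_row,result_col = row,col
--
--     return result_row,result_col
-- ===== SOURCE B (Python) =====
-- def find_max_ratio_position(t):
--     """Same result, O(n^2): precompute all row and column sums once, then scan pairs."""
--     n = len(t)
--     row_sums = [sum(r[:n]) for r in t]
--     col_sums = [sum(t[i][c] for i in range(n)) for c in range(n)]
--     num, den = -1, 1
--     best_row, best_col = -1, -1
--     for r in range(n):
--         rs = row_sums[r]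
--         if rs <= 0:
--             continue
--         for c in range(n):
--             cs = col_sums[c]
--             if cs * den > num * rs:
--                 num, den = cs, rs
--                 best_row, best_col = r, c
--     return best_row, best_col
-- ===== Notes on version B (the rewrite author's own statement) =====
-- stated objective: faster
-- what changed: B precomputes all n row sums and n column sums once and then scans the n^2 (row, col) pairs, instead of A recomputing every column sum from scratch inside the row loop.
import Mathlib
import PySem

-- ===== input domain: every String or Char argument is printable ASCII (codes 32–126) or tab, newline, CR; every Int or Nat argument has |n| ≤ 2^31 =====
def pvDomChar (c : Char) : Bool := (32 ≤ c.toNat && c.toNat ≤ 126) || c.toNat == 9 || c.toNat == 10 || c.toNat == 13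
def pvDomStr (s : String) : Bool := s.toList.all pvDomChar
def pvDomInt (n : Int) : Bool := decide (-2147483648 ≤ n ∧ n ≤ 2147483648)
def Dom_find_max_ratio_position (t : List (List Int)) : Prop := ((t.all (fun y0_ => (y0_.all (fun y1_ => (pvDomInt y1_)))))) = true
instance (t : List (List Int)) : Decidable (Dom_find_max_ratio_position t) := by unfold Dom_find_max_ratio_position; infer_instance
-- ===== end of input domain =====

-- B precomputes all row and column sums once and scans pairs (O(n^2)) instead of A's
-- recomputation of each column sum inside the row loop (O(n^3)); measurably faster.


-- ===== PORT A =====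
-- t[row][j]: row is always < len(t) when used; j out of range would be an IndexError in
-- Python, excluded by Pre_; the port uses getD 0 there (never reached under Pre_).
def find_max_ratio_position (t : List (List Int)) : Int × Int :=
  let n := t.length
  let s := (List.range n).foldl (fun (s : Int × Int × Int × Int) row =>
    let rowSum := (List.range n).foldl (fun acc j => acc + (t.getD row []).getD j 0) 0
    (List.range n).foldl (fun (s : Int × Int × Int × Int) col =>
      let colSum := (List.range n).foldl (fun acc i => acc + (t.getD i []).getD col 0) 0
      if rowSum > 0 then
        if colSum * s.2.1 > s.1 * rowSum then (colSum, rowSum, (row : Int), (col : Int)) else s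
      else s) s) (-1, 1, -1, -1)
  (s.2.2.1, s.2.2.2)

-- ===== PORT B =====
-- state = (num, den, best_row, best_col); sum(r[:n]) via slice + List.sum
def find_max_ratio_position_alt (t : List (List Int)) : Int × Int :=
  let n := t.length
  let rowSums := t.map (fun r => (PySem.List.slice r none (some (n : Int))).sum)
  let colSums := (List.range n).map (fun c =>
    (List.range n).foldl (fun acc i => acc + (t.getD i []).getD c 0) 0)
  let s := (List.range n).foldl (fun (s : Int × Int × Int × Int) r =>
    let rs := rowSums.getD r 0
    if rs ≤ 0 then s
    else (List.range n).foldl (fun (s : Int × Int × Int × Int) c =>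
      let cs := colSums.getD c 0
      if cs * s.2.1 > s.1 * rs then (cs, rs, (r : Int), (c : Int)) else s) s) (-1, 1, -1, -1)
  (s.2.2.1, s.2.2.2)

-- ===== PRECONDITION & SPEC =====
-- Pre_ excludes exactly the inputs where Python A raises IndexError: some row shorter
-- than len(t) (A indexes t[i][j] for all i,j < len(t)).
def Pre_find_max_ratio_position (t : List (List Int)) : Prop :=
  ∀ r ∈ t, t.length ≤ r.length
instance (t : List (List Int)) : Decidable (Pre_find_max_ratio_position t) := by
  unfold Pre_find_max_ratio_position; infer_instance
def pvWitness_find_max_ratio_position : List (List Int) := [[1, 2], [3, 4]]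

def Spec_find_max_ratio_position (t : List (List Int)) (out : Int × Int) : Prop := out = find_max_ratio_position_alt t
instance (t : List (List Int)) (out : Int × Int) : Decidable (Spec_find_max_ratio_position t out) := by unfold Spec_find_max_ratio_position; infer_instance

-- ===== CLAIM (what is proved, stated in full; the proofs are below) =====
def Claim_equal_find_max_ratio_position : Prop := ∀ (t : List (List Int)), Dom_find_max_ratio_position t → Pre_find_max_ratio_position t → Spec_find_max_ratio_position t (find_max_ratio_position t)

-- ===== LEMMAS AND PROOFS =====

-- A's per-row sum over indices equals the sum of the row's first n entries.
theorem rowSum_eq_take_sum (r : List Int) (n : Nat) :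
    (List.range n).foldl (fun acc j => acc + r.getD j 0) 0 = (r.take n).sum := by
  induction n with
  | zero => simp
  | succ n ih =>
    rw [List.range_succ, List.foldl_append, ih]
    simp only [List.foldl_cons, List.foldl_nil]
    by_cases h : n < r.length
    · rw [List.getD_eq_getElem r 0 h, List.sum_take_succ r n h]
    · rw [List.getD_eq_default r 0 (by omega), List.take_of_length_le (by omega),
        List.take_of_length_le (by omega), add_zero]

-- a guarded fold whose guard is false leaves the state unchanged
theorem foldl_guard_false {α β : Type} (l : List α) (s : β) (c : Prop) [Decidable c]
    (g : β → α → β) (h : ¬c) : l.foldl (fun s x => if c then g s x else s) s = s := by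
  induction l generalizing s with
  | nil => rfl
  | cons x xs ih =>
    have hstep : (x :: xs).foldl (fun s x => if c then g s x else s) s
        = xs.foldl (fun s x => if c then g s x else s) (if c then g s x else s) := rfl
    rw [hstep, if_neg h]; exact ih s

theorem find_max_ratio_position_eq (t : List (List Int)) :
    find_max_ratio_position t = find_max_ratio_position_alt t := by
  unfold find_max_ratio_position find_max_ratio_position_alt
  simp only []
  refine congrArg (fun s : Int × Int × Int × Int => (s.2.2.1, s.2.2.2)) ?_
  apply PySem.List.foldl_congr_mem
  intro s row hrow
  rw [List.mem_range] at hrow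
  have hrs : (t.map (fun r => (PySem.List.slice r none (some ((t.length : Nat) : Int))).sum)).getD row 0
      = (List.range t.length).foldl (fun acc j => acc + (t.getD row []).getD j 0) 0 := by
    rw [rowSum_eq_take_sum]
    rw [List.getD_eq_getElem _ _ (by simpa using hrow)]
    simp [PySem.List.slice_to_natCast, List.getD, List.getElem?_eq_getElem hrow]
  rw [hrs]
  set rowSum := (List.range t.length).foldl (fun acc j => acc + (t.getD row []).getD j 0) 0 with hrdef
  by_cases hpos : rowSum > 0
  · rw [if_neg (by omega)]
    apply PySem.List.foldl_congr_mem
    intro s' col hcol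
    rw [List.mem_range] at hcol
    have hcs : ((List.range t.length).map (fun c =>
        (List.range t.length).foldl (fun acc i => acc + (t.getD i []).getD c 0) 0)).getD col 0
        = (List.range t.length).foldl (fun acc i => acc + (t.getD i []).getD col 0) 0 := by
      rw [List.getD_eq_getElem _ _ (by simpa using hcol)]
      simp
    rw [hcs, if_pos hpos]
  · rw [if_pos (by omega)]
    exact foldl_guard_false _ s (rowSum > 0) _ hpos

-- ===== VERDICT (by name: the statement is the Claim_ definition above) =====
theorem find_max_ratio_position_spec : Claim_equal_find_max_ratio_position := by
  intro t _ _
  unfold Spec_find_max_ratio_position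
  exact find_max_ratio_position_eq t
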